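-- pv_equiv track=rewrite | github.com/Sanjay-2004/Elite | day5/1vaccination.py | end
-- ===== SOURCE A (Python) =====
-- def end(arr):
--     flag = True
--     for i in arr:
--         if(i<0 and flag==False):
--             return False
--         elif(i>0):
--             flag=False
--     return True
-- ===== SOURCE B (Python) =====
-- def end(arr):
--     p = next((i for i, x in enumerate(arr) if x > 0), None)
--     if p is None:
--         return True
--     return not any(x < 0 for x in arr[p+1:])
-- ===== Notes on version B (the rewrite author's own statement) =====
-- stated objective: simpler
-- what changed: A's single stateful flag-scan is replaced by a two-step decomposition: locate the first strictly-positive element, then check that no element after it is strictly negative.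
import Mathlib
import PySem

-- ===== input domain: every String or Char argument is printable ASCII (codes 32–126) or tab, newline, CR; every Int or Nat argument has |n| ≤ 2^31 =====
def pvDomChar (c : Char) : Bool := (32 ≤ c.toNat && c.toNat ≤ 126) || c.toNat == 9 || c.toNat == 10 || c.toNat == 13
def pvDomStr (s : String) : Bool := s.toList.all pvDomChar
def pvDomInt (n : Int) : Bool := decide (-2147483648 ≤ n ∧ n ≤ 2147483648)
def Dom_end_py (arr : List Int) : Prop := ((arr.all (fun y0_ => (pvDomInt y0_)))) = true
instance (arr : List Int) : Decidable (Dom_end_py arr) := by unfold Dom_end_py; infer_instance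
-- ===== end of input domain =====

-- B replaces A's stateful flag-scan by: locate the first positive element, then scan the tail for a negative (objective: simpler decomposition).

-- ===== PORT A =====
-- A's for-loop with the `flag` state and early return.
def end_py_loop : List Int → Bool → Bool
  | [], _ => true
  | i :: rest, flag =>
    if i < 0 && flag == false then false
    else if i > 0 then end_py_loop rest false
    else end_py_loop rest flag

def end_py (arr : List Int) : Bool := end_py_loop arr true

-- ===== PORT B =====
-- `next((i for i,x in enumerate(arr) if x>0), None)` = first index with x>0; `arr[p+1:]` via PySem slice.
def end_py_alt (arr : List Int) : Bool :=
  match List.findIdx? (fun x => x > 0) arr with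
  | none => true
  | some p => ! (PySem.List.slice arr (some ((p : Int) + 1)) none).any (fun x => x < 0)

-- ===== PRECONDITION & SPEC =====
def Spec_end_py (arr : List Int) (out : Bool) : Prop := out = end_py_alt arr
instance (arr : List Int) (out : Bool) : Decidable (Spec_end_py arr out) := by unfold Spec_end_py; infer_instance

-- ===== CLAIM (what is proved, stated in full; the proofs are below) =====
def Claim_equal_end_py : Prop := ∀ (arr : List Int), Dom_end_py arr → Spec_end_py arr (end_py arr)

-- ===== LEMMAS AND PROOFS =====

lemma end_py_alt_eq_drop (arr : List Int) :
    end_py_alt arr =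
      match List.findIdx? (fun x => x > 0) arr with
      | none => true
      | some p => ! (arr.drop (p + 1)).any (fun x => x < 0) := by
  unfold end_py_alt
  cases h : List.findIdx? (fun x => x > 0) arr with
  | none => rfl
  | some p =>
    dsimp only
    rw [show ((p : Int) + 1) = ((p + 1 : Nat) : Int) from by push_cast; ring,
       PySem.List.slice_from_natCast]

lemma end_py_loop_false (arr : List Int) :
    end_py_loop arr false = ! arr.any (fun x => x < 0) := by
  induction arr with
  | nil => rfl
  | cons x rest ih =>
    by_cases hx : x < 0
    · simp [end_py_loop, hx]
    · have hx' : ¬ (decide (x < 0) = true) := by simp [hx]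
      by_cases hp : x > 0 <;> simp [end_py_loop, hx, hp, ih]

lemma end_py_loop_true (arr : List Int) :
    end_py_loop arr true = end_py_alt arr := by
  induction arr with
  | nil => rfl
  | cons x rest ih =>
    rw [end_py_alt_eq_drop]
    by_cases hp : x > 0
    · have hx : ¬ x < 0 := by omega
      simp [end_py_loop, hx, hp, List.findIdx?_cons, end_py_loop_false]
    · rw [show end_py_loop (x :: rest) true = end_py_loop rest true from by
            simp [end_py_loop, hp],
         ih, end_py_alt_eq_drop]
      simp only [List.findIdx?_cons, show (decide (x > 0)) = false from by simp [hp],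
        Bool.false_eq_true, if_false]
      cases h : List.findIdx? (fun x => decide (x > 0)) rest with
      | none => rfl
      | some p => simp [List.drop_succ_cons]

-- ===== VERDICT (by name: the statement is the Claim_ definition above) =====
theorem end_py_spec : Claim_equal_end_py := by
  intro arr _
  unfold Spec_end_py end_py
  exact end_py_loop_true arr
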